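-- pv_equiv track=rewrite | github.com/FlyfishSec/rcX | rcX.py | _sanatizeExpansionString
-- ===== SOURCE A (Python) =====
-- def _sanatizeExpansionString(exStr):
--     oddSlashes = False
--     for char in exStr[::-1]:
--         if char == "\\":
--             oddSlashes = not oddSlashes
--         else:
--             break
--     if oddSlashes:
--         exStr += "\\"
--     return exStr
-- ===== SOURCE B (Python) =====
-- def _sanatizeExpansionString(exStr):
--     t = exStr
--     while t.endswith("\\\\"):
--         t = t[:-2]
--     if t.endswith("\\"):
--         exStr += "\\"
--     return exStr
-- ===== Notes on version B (the rewrite author's own statement) =====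
-- stated objective: alternative
-- what changed: Replaces A's reversed-scan parity toggle with a pair-stripping loop: repeatedly strip a trailing backslash pair, then append a backslash exactly when a single trailing backslash remains.
import Mathlib
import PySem

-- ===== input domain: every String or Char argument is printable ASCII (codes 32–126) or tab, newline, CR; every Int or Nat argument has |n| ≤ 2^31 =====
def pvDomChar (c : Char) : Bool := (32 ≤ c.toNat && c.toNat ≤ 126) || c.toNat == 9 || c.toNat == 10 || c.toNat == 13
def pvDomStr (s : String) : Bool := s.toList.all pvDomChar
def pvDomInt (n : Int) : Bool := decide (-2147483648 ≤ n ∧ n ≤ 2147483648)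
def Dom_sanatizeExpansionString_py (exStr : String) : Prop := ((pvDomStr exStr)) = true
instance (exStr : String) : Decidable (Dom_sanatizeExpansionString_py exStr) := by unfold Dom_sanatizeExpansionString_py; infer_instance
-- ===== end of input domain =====

-- B replaces A's reversed-scan toggle loop by a pair-stripping loop: strip trailing backslash PAIRS, then
-- append a backslash exactly when a single trailing backslash remains; objective: alternative (same cost).

-- ===== PORT A =====
-- the 'for char in exStr[::-1]' loop with its break: toggle while the char is a backslash, stop at the first other char
def pvALoop : List Char → Bool → Bool
  | [], odd => odd
  | c :: rest, odd => if c = '\\' then pvALoop rest (!odd) else odd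

def sanatizeExpansionString_py (exStr : String) : String :=
  let oddSlashes := pvALoop ((PySem.List.slice? exStr.toList none none (-1)).getD []) false
  if oddSlashes then String.ofList (exStr.toList ++ ['\\']) else exStr

-- ===== PORT B =====
-- the 'while t.endswith("\\\\"): t = t[:-2]' loop of Source B
def pvStripPairs (t : List Char) : List Char :=
  if h : PySem.Chars.endswith t ['\\', '\\'] = true then
    pvStripPairs (PySem.List.slice t none (some (-2)))
  else t
  termination_by t.length
  decreasing_by
    rw [PySem.List.slice_to_neg_ofNat t 2 (by omega)]
    have hsuf : ['\\', '\\'] <:+ t := (PySem.Chars.endswith_iff _ _).mp h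
    have hlen : 2 ≤ t.length := by simpa using hsuf.length_le
    simp [List.length_take]; omega

def sanatizeExpansionString_py_alt (exStr : String) : String :=
  let t := pvStripPairs exStr.toList
  if PySem.Chars.endswith t ['\\'] then String.ofList (exStr.toList ++ ['\\']) else exStr

-- ===== PRECONDITION & SPEC =====
def Spec_sanatizeExpansionString_py (exStr : String) (out : String) : Prop := out = sanatizeExpansionString_py_alt exStr
instance (exStr : String) (out : String) : Decidable (Spec_sanatizeExpansionString_py exStr out) := by unfold Spec_sanatizeExpansionString_py; infer_instance

-- ===== CLAIM (what is proved, stated in full; the proofs are below) =====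
def Claim_equal_sanatizeExpansionString_py : Prop := ∀ (exStr : String), Dom_sanatizeExpansionString_py exStr → Spec_sanatizeExpansionString_py exStr (sanatizeExpansionString_py exStr)

-- ===== LEMMAS AND PROOFS =====
-- A's loop toggles its flag once per char of the leading backslash run
theorem pvALoop_eq (l : List Char) (b : Bool) :
    pvALoop l b = (xor b (decide ((l.takeWhile (· == '\\')).length % 2 = 1))) := by
  induction l generalizing b with
  | nil => simp [pvALoop, List.takeWhile]
  | cons c rest ih =>
    by_cases hc : c = '\\'
    · subst hc
      simp only [pvALoop, ih, List.takeWhile_cons, beq_self_eq_true, if_pos]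
      rcases Nat.even_or_odd (rest.takeWhile (· == '\\')).length with h | h
      · have h1 : (rest.takeWhile (· == '\\')).length % 2 = 0 := Nat.even_iff.mp h
        have h2 : ((rest.takeWhile (· == '\\')).length + 1) % 2 = 1 := by omega
        simp [h1, h2, Bool.xor_comm]
      · have h1 : (rest.takeWhile (· == '\\')).length % 2 = 1 := Nat.odd_iff.mp h
        have h2 : ((rest.takeWhile (· == '\\')).length + 1) % 2 = 0 := by omega
        simp [h1, h2]
    · have : (c == '\\') = false := by simpa using hc
      simp [pvALoop, hc, this]

-- ends-with a single backslash, read on the reversed list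
theorem pvEndsSingle (u : List Char) :
    PySem.Chars.endswith u ['\\'] = true ↔ ∃ r, u.reverse = '\\' :: r := by
  rw [PySem.Chars.endswith_iff]
  constructor
  · rintro ⟨pre, rfl⟩; exact ⟨pre.reverse, by simp⟩
  · rintro ⟨r, hr⟩
    refine ⟨r.reverse, ?_⟩
    have := congrArg List.reverse hr
    simpa using this.symm

-- ends-with a backslash pair, read on the reversed list
theorem pvEndsPair (u : List Char) :
    PySem.Chars.endswith u ['\\', '\\'] = true ↔ ∃ r, u.reverse = '\\' :: '\\' :: r := by
  rw [PySem.Chars.endswith_iff]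
  constructor
  · rintro ⟨pre, rfl⟩; exact ⟨pre.reverse, by simp⟩
  · rintro ⟨r, hr⟩
    refine ⟨r.reverse, ?_⟩
    have := congrArg List.reverse hr
    simpa using this.symm

-- the stripped result ends with a single backslash exactly when the trailing run has odd length
theorem pvStrip_head (t : List Char) :
    PySem.Chars.endswith (pvStripPairs t) ['\\'] = true ↔
      (t.reverse.takeWhile (· == '\\')).length % 2 = 1 := by
  induction t using pvStripPairs.induct with
  | case1 t h ih =>
    obtain ⟨pre, hp⟩ := (PySem.Chars.endswith_iff _ _).mp h
    have hr : t.reverse = '\\' :: '\\' :: pre.reverse := by rw [← hp]; simp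
    have hstep : pvStripPairs t = pvStripPairs (PySem.List.slice t none (some (-2))) := by
      rw [pvStripPairs]; simp [h]
    have hslice : PySem.List.slice t none (some (-2)) = pre := by
      rw [PySem.List.slice_to_neg_ofNat t 2 (by omega), ← hp]
      simp
    rw [hslice] at ih
    rw [hstep, hslice, ih, hr]
    simp only [List.takeWhile_cons, beq_self_eq_true, if_pos, List.length_cons]
    omega
  | case2 t h =>
    have hnp : ¬ ∃ r, t.reverse = '\\' :: '\\' :: r := fun he => h ((pvEndsPair t).mpr he)
    have hself : pvStripPairs t = t := by rw [pvStripPairs, dif_neg h]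
    rw [hself, pvEndsSingle]
    match hm : t.reverse with
    | [] => simp
    | '\\' :: rest =>
      match rest with
      | [] => simp
      | '\\' :: r => exact absurd ⟨r, hm⟩ hnp
      | c :: r =>
        by_cases hc : c = '\\'
        · exact absurd ⟨r, hc ▸ hm⟩ hnp
        · have hcb : (c == '\\') = false := by simpa using hc
          simp [hcb]
    | c :: rest =>
      by_cases hc : c = '\\'
      · subst hc
        match rest with
        | [] => simp
        | '\\' :: r => exact absurd ⟨r, hm⟩ hnp
        | d :: r =>
          by_cases hd : d = '\\'
          · exact absurd ⟨r, hd ▸ hm⟩ hnp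
          · have hdb : (d == '\\') = false := by simpa using hd
            simp [hdb]
      · have hcb : (c == '\\') = false := by simpa using hc
        simp [hcb, hc]

-- ===== VERDICT (by name: the statement is the Claim_ definition above) =====
theorem sanatizeExpansionString_py_spec : Claim_equal_sanatizeExpansionString_py := by
  intro exStr _
  unfold Spec_sanatizeExpansionString_py sanatizeExpansionString_py sanatizeExpansionString_py_alt
  rw [PySem.List.slice?_none_none_neg_one]
  simp only [Option.getD_some, pvALoop_eq, Bool.false_xor]
  have hb : PySem.Chars.endswith (pvStripPairs exStr.toList) ['\\']
      = decide ((exStr.toList.reverse.takeWhile (· == '\\')).length % 2 = 1) := by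
    rcases Bool.eq_false_or_eq_true (PySem.Chars.endswith (pvStripPairs exStr.toList) ['\\']) with h | h
    · rw [h]; symm; rw [decide_eq_true_eq]; exact (pvStrip_head _).mp h
    · rw [h]; symm; rw [decide_eq_false_iff_not]
      intro hp; rw [← pvStrip_head] at hp; simp [h] at hp
  rw [hb]
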